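-- pv_equiv track=rewrite | github.com/VeriDevOps/Napkin | packages_src/bt/bt/compare/misc.py | binsig_to_intervals
-- ===== SOURCE A (Python) =====
-- def binsig_to_intervals(T = [4, 6, 7, 9, 10, 12],
--                         V = [0, 0, 1, 0, 1, 1],
--                         invert = False):
-- #-----------------------------------------------------------------
--     res = []
--     s = None
--     if invert:
--         on = 0
--         off = 1
--     else:
--         on = 1
--         off = 0
--     for i,t in enumerate(T):
--         if s == None and V[i] == on:
--             s = t
--             continue
--         # interval has started already
--         # but we are still inside it
--         if s != None and V[i] == on:
--             continue
--         # We have started an interval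
--         # but it is now closing
--         if s != None and V[i] == off:
--             res.append([s,t])
--             s = None
--     if s != None:
--         res.append([s,t])
--     return res
-- ===== SOURCE B (Python) =====
-- def binsig_to_intervals(T = [4, 6, 7, 9, 10, 12],
--                         V = [0, 0, 1, 0, 1, 1],
--                         invert = False):
--     on, off = (0, 1) if invert else (1, 0)
--     n = len(T)
--     res = []
--     i = 0
--     while i < n:
--         if V[i] == on:
--             start = T[i]
--             j = i + 1
--             while j < n and V[j] != off:
--                 j += 1
--             if j < n:
--                 res.append([start, T[j]])
--             else:
--                 res.append([start, T[n - 1]])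
--             i = j + 1
--         else:
--             i += 1
--     return res
-- ===== Notes on version B (the rewrite author's own statement) =====
-- stated objective: alternative
-- what changed: Replaced A's single fold threading an Option sentinel state (s=None flag machine with a trailing close using the leftover loop variable) by explicit run detection: an outer index loop finds each run start and an inner scan finds its closing 'off' index (or the last timestamp).
import Mathlib
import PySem

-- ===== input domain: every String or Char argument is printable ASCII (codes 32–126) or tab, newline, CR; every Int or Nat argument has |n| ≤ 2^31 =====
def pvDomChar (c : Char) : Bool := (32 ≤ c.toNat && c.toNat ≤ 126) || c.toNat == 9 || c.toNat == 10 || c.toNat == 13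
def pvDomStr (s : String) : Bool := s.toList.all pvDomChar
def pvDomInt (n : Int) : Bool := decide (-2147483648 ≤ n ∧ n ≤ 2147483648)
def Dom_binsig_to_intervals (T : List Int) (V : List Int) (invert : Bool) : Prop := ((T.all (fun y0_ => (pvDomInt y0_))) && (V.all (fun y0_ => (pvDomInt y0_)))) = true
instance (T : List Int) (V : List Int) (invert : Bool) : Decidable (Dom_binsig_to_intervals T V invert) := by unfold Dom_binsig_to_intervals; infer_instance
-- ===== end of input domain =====

-- B replaces A's flag-based state machine (an Option sentinel threaded through one fold) by explicit
-- run detection with two index loops (find a run start, then scan ahead to its closing `off`); same cost,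
-- objective: alternative decomposition. Equivalence is claimed on Pre_ (V at least as long as T; shorter V
-- makes the Python A raise IndexError).

-- ===== PORT A =====
-- one loop step of A: state (res, s, t); p = (i, t) from enumerate(T)
def stepA (V : List Int) (on_ off : Int) (acc : List (List Int) × Option Int × Int) (p : Int × Int) : List (List Int) × Option Int × Int :=
  let res := acc.1
  let s := acc.2.1
  let v := PySem.List.pyGetD V p.1 0   -- V[i]; exact under Pre_ (index in range)
  if s = none ∧ v = on_ then (res, some p.2, p.2)
  else if s ≠ none ∧ v = on_ then (res, s, p.2)
  else if s ≠ none ∧ v = off then (res ++ [[s.getD 0, p.2]], none, p.2)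
  else (res, s, p.2)

def binsig_to_intervals (T : List Int) (V : List Int) (invert : Bool) : List (List Int) :=
  let on_ : Int := if invert then 0 else 1
  let off : Int := if invert then 1 else 0
  match (PySem.List.enumerate T 0).foldl (stepA V on_ off) ([], none, 0) with
  | (res, some a, t) => res ++ [[a, t]]
  | (res, none, _) => res

-- ===== PORT B =====
-- inner while loop of B: first index j' ≥ j (< n) with V[j'] == off, else n (or beyond-start j itself if j ≥ n)
def altFind (V : List Int) (off : Int) (n j : Nat) : Nat :=
  if j < n then
    if PySem.List.pyGetD V (j : Int) 0 ≠ off then altFind V off n (j+1) else j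
  else j
termination_by n - j

theorem altFind_ge (V : List Int) (off : Int) (n j : Nat) : j ≤ altFind V off n j := by
  unfold altFind
  split
  · split
    · have := altFind_ge V off n (j+1); omega
    · omega
  · omega
termination_by n - j

-- outer while loop of B
def altGo (T V : List Int) (on_ off : Int) (n i : Nat) : List (List Int) :=
  if h : i < n then
    if PySem.List.pyGetD V (i : Int) 0 = on_ then
      let start := PySem.List.pyGetD T (i : Int) 0
      let j := altFind V off n (i+1)
      (if j < n then [start, PySem.List.pyGetD T (j : Int) 0]
       else [start, PySem.List.pyGetD T ((n : Int) - 1) 0]) :: altGo T V on_ off n (j+1)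
    else altGo T V on_ off n (i+1)
  else []
termination_by n - i
decreasing_by
  · have := altFind_ge V off n (i+1); omega
  · omega

def binsig_to_intervals_alt (T : List Int) (V : List Int) (invert : Bool) : List (List Int) :=
  let on_ : Int := if invert then 0 else 1
  let off : Int := if invert then 1 else 0
  altGo T V on_ off T.length 0

-- ===== PRECONDITION & SPEC =====
-- Pre_ excludes exactly the inputs where Python A raises IndexError: V shorter than T.
def Pre_binsig_to_intervals (T : List Int) (V : List Int) (invert : Bool) : Prop := T.length ≤ V.length
instance (T : List Int) (V : List Int) (invert : Bool) : Decidable (Pre_binsig_to_intervals T V invert) := by unfold Pre_binsig_to_intervals; infer_instance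
def pvWitness_binsig_to_intervals : List Int × List Int × Bool := ([4, 6, 7, 9], [0, 1, 1, 0], false)

def Spec_binsig_to_intervals (T : List Int) (V : List Int) (invert : Bool) (out : List (List Int)) : Prop := out = binsig_to_intervals_alt T V invert
instance (T : List Int) (V : List Int) (invert : Bool) (out : List (List Int)) : Decidable (Spec_binsig_to_intervals T V invert out) := by unfold Spec_binsig_to_intervals; infer_instance

-- ===== CLAIM (what is proved, stated in full; the proofs are below) =====
def Claim_equal_binsig_to_intervals : Prop := ∀ (T : List Int) (V : List Int) (invert : Bool), Dom_binsig_to_intervals T V invert → Pre_binsig_to_intervals T V invert → Spec_binsig_to_intervals T V invert (binsig_to_intervals T V invert)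

-- ===== LEMMAS AND PROOFS =====

-- common reference recursion: A's state machine written index-wise
def cGo (T V : List Int) (on_ off : Int) (n i : Nat) (s : Option Int) : List (List Int) :=
  if h : i < n then
    let v := PySem.List.pyGetD V (i : Int) 0
    match s with
    | none =>
        if v = on_ then cGo T V on_ off n (i+1) (some (PySem.List.pyGetD T (i : Int) 0))
        else cGo T V on_ off n (i+1) none
    | some a =>
        if v = on_ then cGo T V on_ off n (i+1) (some a)
        else if v = off then [a, PySem.List.pyGetD T (i : Int) 0] :: cGo T V on_ off n (i+1) none
        else cGo T V on_ off n (i+1) (some a)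
  else
    match s with
    | some a => [[a, PySem.List.pyGetD T ((n : Int) - 1) 0]]
    | none => []
termination_by n - i

def finishA (st : List (List Int) × Option Int × Int) : List (List Int) :=
  match st with
  | (res, some a, t) => res ++ [[a, t]]
  | (res, none, _) => res

theorem A_loop (T V : List Int) (on_ off : Int) (i : Nat) (hi : i ≤ T.length)
    (res : List (List Int)) (s : Option Int) (t : Int)
    (ht : s ≠ none → i = T.length → t = PySem.List.pyGetD T ((T.length : Int) - 1) 0) :
    finishA ((PySem.List.enumerate (T.drop i) (i : Int)).foldl (stepA V on_ off) (res, s, t))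
      = res ++ cGo T V on_ off T.length i s := by
  induction hk : T.length - i using Nat.strong_induction_on generalizing i res s t with
  | _ k IH =>
  subst hk
  by_cases h : i < T.length
  · have hti : PySem.List.pyGetD T ((i : Nat) : Int) 0 = T[i] := by
      rw [PySem.List.pyGetD_natCast, List.getD_eq_getElem T 0 h]
    have hlast : i + 1 = T.length → T[i] = PySem.List.pyGetD T ((T.length : Int) - 1) 0 := by
      intro he
      have : ((T.length : Int) - 1) = ((i : Nat) : Int) := by omega
      rw [this, hti]
    rw [List.drop_eq_getElem_cons h, PySem.List.enumerate_cons, List.foldl_cons]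
    have hcast : (i : Int) + 1 = ((i + 1 : Nat) : Int) := by push_cast; ring
    rw [hcast, cGo.eq_def, dif_pos h]
    simp only []
    cases s with
    | none =>
      by_cases hv : PySem.List.pyGetD V ((i : Nat) : Int) 0 = on_
      · simp only [stepA, hv, and_self, and_true, if_true]
        rw [IH (T.length - (i+1)) (by omega) (i+1) (by omega) res (some T[i]) T[i]
              (fun _ he => hlast he) rfl]
        rw [hti]
      · simp only [stepA]
        rw [if_neg (fun hc => hv hc.2), if_neg (fun hc => hc.1 rfl), if_neg (fun hc => hc.1 rfl)]
        rw [IH (T.length - (i+1)) (by omega) (i+1) (by omega) res none T[i] (by simp) rfl]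
        rw [if_neg hv]
    | some a =>
      by_cases hv : PySem.List.pyGetD V ((i : Nat) : Int) 0 = on_
      · simp only [stepA]
        rw [if_neg (fun hc => Option.some_ne_none a hc.1),
            if_pos (⟨fun hc => Option.some_ne_none a hc, hv⟩ :
              (some a ≠ none ∧ PySem.List.pyGetD V ((i : Nat) : Int) 0 = on_))]
        rw [IH (T.length - (i+1)) (by omega) (i+1) (by omega) res (some a) T[i]
              (fun _ he => hlast he) rfl]
        rw [if_pos hv]
      · by_cases hw : PySem.List.pyGetD V ((i : Nat) : Int) 0 = off
        · simp only [stepA]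
          rw [if_neg (fun hc => Option.some_ne_none a hc.1), if_neg (fun hc => hv hc.2),
              if_pos (⟨fun hc => Option.some_ne_none a hc, hw⟩ :
                (some a ≠ none ∧ PySem.List.pyGetD V ((i : Nat) : Int) 0 = off))]
          simp only [Option.getD_some]
          rw [IH (T.length - (i+1)) (by omega) (i+1) (by omega) (res ++ [[a, T[i]]]) none T[i]
                (by simp) rfl]
          rw [if_neg hv, if_pos hw, hti]
          simp
        · simp only [stepA]
          rw [if_neg (fun hc => Option.some_ne_none a hc.1), if_neg (fun hc => hv hc.2),
              if_neg (fun hc => hw hc.2)]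
          rw [IH (T.length - (i+1)) (by omega) (i+1) (by omega) res (some a) T[i]
              (fun _ he => hlast he) rfl]
          rw [if_neg hv, if_neg hw]
  · have he : i = T.length := by omega
    have hdrop : T.drop i = [] := by rw [List.drop_eq_nil_iff]; omega
    rw [hdrop, PySem.List.enumerate_nil, List.foldl_nil, cGo.eq_def, dif_neg h]
    cases s with
    | none => simp [finishA]
    | some a =>
      have := ht (by simp) he
      simp only [finishA, this]

theorem cGo_some (T V : List Int) (on_ off : Int) (hno : on_ ≠ off) (n k : Nat) (hk : k ≤ n) (a : Int) :
    cGo T V on_ off n k (some a) =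
      (if altFind V off n k < n then [a, PySem.List.pyGetD T ((altFind V off n k : Nat) : Int) 0]
       else [a, PySem.List.pyGetD T ((n : Int) - 1) 0]) :: cGo T V on_ off n (altFind V off n k + 1) none := by
  induction hm : n - k using Nat.strong_induction_on generalizing k with
  | _ m IH =>
  subst hm
  by_cases h : k < n
  · rw [cGo.eq_def, dif_pos h]
    simp only []
    by_cases hv : PySem.List.pyGetD V ((k : Nat) : Int) 0 = on_
    · have hvo : PySem.List.pyGetD V ((k : Nat) : Int) 0 ≠ off := by rw [hv]; exact hno
      have hstep : altFind V off n k = altFind V off n (k+1) := by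
        conv_lhs => rw [altFind]
        rw [if_pos h, if_pos hvo]
      rw [if_pos hv, IH (n - (k+1)) (by omega) (k+1) (by omega) rfl, ← hstep]
    · by_cases hw : PySem.List.pyGetD V ((k : Nat) : Int) 0 = off
      · rw [if_neg hv, if_pos hw]
        have hf : altFind V off n k = k := by rw [altFind, if_pos h, if_neg (by simp [hw])]
        rw [hf, if_pos h]
      · have hstep : altFind V off n k = altFind V off n (k+1) := by
          conv_lhs => rw [altFind]
          rw [if_pos h, if_pos hw]
        rw [if_neg hv, if_neg hw, IH (n - (k+1)) (by omega) (k+1) (by omega) rfl, ← hstep]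
  · have hf : altFind V off n k = k := by rw [altFind, if_neg h]
    rw [hf, if_neg h, cGo.eq_def, dif_neg h]
    have hknn : ¬ (k + 1 < n) := by omega
    rw [cGo.eq_def, dif_neg hknn]

theorem cGo_eq_altGo (T V : List Int) (on_ off : Int) (hno : on_ ≠ off) (n i : Nat) :
    altGo T V on_ off n i = cGo T V on_ off n i none := by
  induction hm : n - i using Nat.strong_induction_on generalizing i with
  | _ m IH =>
  subst hm
  by_cases h : i < n
  · rw [altGo, dif_pos h, cGo.eq_def, dif_pos h]
    simp only []
    by_cases hv : PySem.List.pyGetD V ((i : Nat) : Int) 0 = on_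
    · rw [if_pos hv, if_pos hv]
      have hge := altFind_ge V off n (i+1)
      rw [cGo_some T V on_ off hno n (i+1) (by omega),
          IH (n - (altFind V off n (i+1) + 1)) (by omega) (altFind V off n (i+1) + 1) rfl]
    · rw [if_neg hv, if_neg hv, IH (n - (i+1)) (by omega) (i+1) rfl]
  · rw [altGo, dif_neg h, cGo.eq_def, dif_neg h]

-- ===== VERDICT (by name: the statement is the Claim_ definition above) =====
theorem binsig_to_intervals_spec : Claim_equal_binsig_to_intervals := by
  intro T V invert _ _
  unfold Spec_binsig_to_intervals binsig_to_intervals binsig_to_intervals_alt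
  have hno : (if invert then (0:Int) else 1) ≠ (if invert then (1:Int) else 0) := by
    cases invert <;> decide
  have h1 := A_loop T V (if invert then 0 else 1) (if invert then 1 else 0) 0 (by omega) [] none 0
    (fun hc _ => absurd rfl hc)
  simp only [List.drop_zero, Nat.cast_zero, List.nil_append] at h1
  rw [cGo_eq_altGo T V _ _ hno T.length 0]
  rw [← h1]
  rfl
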